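-- pv_equiv track=rewrite | github.com/arayac/data_mining | NaiveBayesTextClassifier2.py | create_vocab_dict
-- ===== SOURCE A (Python) =====
-- def check_dict(a_word, a_dict):
--     stop_words = ['and', 'as', 'the', 'is', 'a','of','it','to', 'you', 'are','so']
--     if a_word in stop_words:
--         return a_dict
--     elif a_word not in a_dict:
--         a_dict[a_word] = 1
--     else:
--         wordcount = a_dict.get(a_word)
--         wordcount += 1
--         a_dict[a_word] = wordcount
--     return a_dict
--
-- def create_vocab_dict(data):
--     vocab_dict = dict()
--     doccount = 0
--     listdict = []
--     for phrase in data: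
--         word_list = phrase.split()
--         doccount += 1
--         listdict.append({})
--         for w in word_list:
--             vocab_dict = check_dict(w, vocab_dict)
--             if w not in listdict[doccount - 1]:
--                 listdict[doccount - 1][w] = 1
--             else:
--                 listdict[doccount - 1][w] += 1
--     return vocab_dict, doccount, listdict
-- ===== SOURCE B (Python) =====
-- def create_vocab_dict(data):
--     stop_words = {'and', 'as', 'the', 'is', 'a', 'of', 'it', 'to', 'you', 'are', 'so'}
--     # pass 1: per-document word counts (stop words included), one table per phrase
--     listdict = []
--     for phrase in data:
--         counts = {}
--         for w in phrase.split():
--             counts[w] = counts.get(w, 0) + 1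
--         listdict.append(counts)
--     # pass 2: global vocabulary aggregated from the per-document tables
--     vocab_dict = {}
--     for counts in listdict:
--         for w, c in counts.items():
--             if w not in stop_words:
--                 vocab_dict[w] = vocab_dict.get(w, 0) + c
--     return vocab_dict, len(data), listdict
-- ===== Notes on version B (the rewrite author's own statement) =====
-- stated objective: simpler
-- what changed: Instead of one interleaved word-by-word loop that updates the global dict and listdict[doccount-1] together via a check_dict helper, B first tabulates each document's counts on its own, then aggregates the global vocabulary from the per-document count tables in a second pass, adding whole counts per word.
import Mathlib
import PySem

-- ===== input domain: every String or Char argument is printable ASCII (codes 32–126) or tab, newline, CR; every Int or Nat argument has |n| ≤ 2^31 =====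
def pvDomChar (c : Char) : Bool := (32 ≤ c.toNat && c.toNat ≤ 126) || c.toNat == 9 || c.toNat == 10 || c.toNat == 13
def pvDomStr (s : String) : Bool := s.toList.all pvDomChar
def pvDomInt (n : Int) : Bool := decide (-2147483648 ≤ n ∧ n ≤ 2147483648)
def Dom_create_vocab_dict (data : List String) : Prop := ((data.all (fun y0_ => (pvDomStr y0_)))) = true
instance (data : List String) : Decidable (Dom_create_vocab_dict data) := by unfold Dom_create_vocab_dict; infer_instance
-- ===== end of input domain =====

-- B splits the single interleaved word loop of A into two passes: per-document count
-- tables first, then the global vocabulary aggregated from those tables (objective: simpler).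

-- ===== PORT A =====
def check_dict (a_word : String) (a_dict : PySem.Dict String Int) : PySem.Dict String Int :=
  let stop_words : List String := ["and", "as", "the", "is", "a", "of", "it", "to", "you", "are", "so"]
  if a_word ∈ stop_words then a_dict
  else if a_dict.contains a_word = false then a_dict.insert a_word 1
  else
    -- a_dict.get(a_word): the key is present on this branch, so the Python value is exactly getD 0
    let wordcount := a_dict.getD a_word 0
    a_dict.insert a_word (wordcount + 1)

-- body of A's inner 'for w in word_list' loop; state = (vocab_dict, doccount, listdict)
def cvdA_inner (st : PySem.Dict String Int × Int × List (PySem.Dict String Int)) (w : String) :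
    PySem.Dict String Int × Int × List (PySem.Dict String Int) :=
  let vocab_dict := check_dict w st.1
  -- listdict[doccount - 1]: on every reachable state 0 ≤ doccount - 1 < len(listdict), so
  -- the Python index is exact (toNat does not clamp and getD/set hit the element)
  let i := (st.2.1 - 1).toNat
  let d := st.2.2.getD i PySem.Dict.empty
  let d := if d.contains w = false then d.insert w 1 else d.insert w (d.getD w 0 + 1)
  (vocab_dict, st.2.1, st.2.2.set i d)

-- body of A's outer 'for phrase in data' loop
def cvdA_outer (st : PySem.Dict String Int × Int × List (PySem.Dict String Int)) (phrase : String) :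
    PySem.Dict String Int × Int × List (PySem.Dict String Int) :=
  (PySem.Str.split₀ phrase).foldl cvdA_inner (st.1, st.2.1 + 1, st.2.2 ++ [PySem.Dict.empty])

def create_vocab_dict (data : List String) : (List (String × Int)) × Int × (List (List (String × Int))) :=
  let st := data.foldl cvdA_outer (PySem.Dict.empty, 0, ([] : List (PySem.Dict String Int)))
  (st.1.items, st.2.1, st.2.2.map (·.items))

-- ===== PORT B =====
def cvdB_stop : PySem.Set String :=
  PySem.Set.ofList ["and", "as", "the", "is", "a", "of", "it", "to", "you", "are", "so"]

-- pass 1 body: one count table for one phrase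
def cvdB_counts (phrase : String) : PySem.Dict String Int :=
  (PySem.Str.split₀ phrase).foldl (fun counts w => counts.insert w (counts.getD w 0 + 1)) PySem.Dict.empty

def create_vocab_dict_alt (data : List String) : (List (String × Int)) × Int × (List (List (String × Int))) :=
  let listdict := data.map cvdB_counts
  -- pass 2: aggregate the global vocabulary from the per-document tables
  let vocab_dict := listdict.foldl (fun v counts =>
      counts.items.foldl
        (fun v p => if p.1 ∈ cvdB_stop then v else v.insert p.1 (v.getD p.1 0 + p.2)) v)
    PySem.Dict.empty
  (vocab_dict.items, (data.length : Int), listdict.map (·.items))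

-- ===== PRECONDITION & SPEC =====
def Spec_create_vocab_dict (data : List String) (out : (List (String × Int)) × Int × (List (List (String × Int)))) : Prop := out = create_vocab_dict_alt data
instance (data : List String) (out : (List (String × Int)) × Int × (List (List (String × Int)))) : Decidable (Spec_create_vocab_dict data out) := by unfold Spec_create_vocab_dict; infer_instance

-- ===== CLAIM (what is proved, stated in full; the proofs are below) =====
def Claim_equal_create_vocab_dict : Prop := ∀ (data : List String), Dom_create_vocab_dict data → Spec_create_vocab_dict data (create_vocab_dict data)

-- ===== LEMMAS AND PROOFS =====

-- A's global-dict update for one word, in closed form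
def cvdG (v : PySem.Dict String Int) (w : String) : PySem.Dict String Int :=
  if w ∈ cvdB_stop then v else v.insert w (v.getD w 0 + 1)

-- B's global-dict update for one (word, count) item
def cvdC (v : PySem.Dict String Int) (p : String × Int) : PySem.Dict String Int :=
  if p.1 ∈ cvdB_stop then v else v.insert p.1 (v.getD p.1 0 + p.2)

-- the per-document count update
def cvdI (d : PySem.Dict String Int) (w : String) : PySem.Dict String Int :=
  d.insert w (d.getD w 0 + 1)

lemma check_dict_eq (w : String) (v : PySem.Dict String Int) : check_dict w v = cvdG v w := by
  unfold check_dict cvdG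
  have hstop : (w ∈ ["and", "as", "the", "is", "a", "of", "it", "to", "you", "are", "so"]) ↔ w ∈ cvdB_stop := by
    simp [cvdB_stop, PySem.Set.mem_ofList]
  by_cases hs : w ∈ cvdB_stop
  · simp [hstop.2 hs, hs]
  · simp only [hstop]
    rcases h : v.contains w with _ | _
    · simp [hs, PySem.Dict.getD_of_not_contains v _ h]
    · simp [hs]

lemma cvdI_eq (d : PySem.Dict String Int) (w : String) :
    (if d.contains w = false then d.insert w 1 else d.insert w (d.getD w 0 + 1)) = cvdI d w := by
  unfold cvdI
  rcases h : d.contains w with _ | _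
  · simp [PySem.Dict.getD_of_not_contains d _ h]
  · simp

-- A's inner loop acts independently on the vocab dict and on the last table of listdict
lemma foldl_inner (ws : List String) (v : PySem.Dict String Int)
    (l : List (PySem.Dict String Int)) (d : PySem.Dict String Int) :
    ws.foldl cvdA_inner (v, ((l.length : Int) + 1), l ++ [d]) =
      (ws.foldl cvdG v, (l.length : Int) + 1, l ++ [ws.foldl cvdI d]) := by
  induction ws generalizing v d with
  | nil => simp
  | cons w ws ih =>
    have hi : (((l.length : Int) + 1) - 1).toNat = l.length := by omega
    have hget : (l ++ [d]).getD l.length PySem.Dict.empty = d := by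
      simp [List.getD_eq_getElem?_getD]
    have hset : ∀ d' : PySem.Dict String Int, (l ++ [d]).set l.length d' = l ++ [d'] := by
      intro d'; rw [List.set_append_right _ _ (le_refl _)]; simp
    simp only [List.foldl_cons, cvdA_inner, hi, hget, hset, cvdI_eq, check_dict_eq]
    exact ih (cvdG v w) (cvdI d w)

-- A's whole loop, in closed form
lemma foldl_outer (data : List String) (v : PySem.Dict String Int) (l : List (PySem.Dict String Int)) :
    data.foldl cvdA_outer (v, (l.length : Int), l) =
      (data.foldl (fun v p => (PySem.Str.split₀ p).foldl cvdG v) v,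
       (l.length : Int) + data.length,
       l ++ data.map (fun p => (PySem.Str.split₀ p).foldl cvdI PySem.Dict.empty)) := by
  induction data generalizing v l with
  | nil => simp
  | cons p rest ih =>
    simp only [List.foldl_cons, cvdA_outer]
    rw [foldl_inner]
    have := ih ((PySem.Str.split₀ p).foldl cvdG v)
      (l ++ [(PySem.Str.split₀ p).foldl cvdI PySem.Dict.empty])
    simp only [List.length_append, List.length_cons, List.length_nil] at this ⊢
    push_cast at this ⊢
    rw [this]
    simp only [List.map_cons]
    refine Prod.ext rfl (Prod.ext ?_ ?_)
    · push_cast; ring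
    · simp

-- two inserts at distinct keys commute when the first key is already present
lemma comm_insert (d : PySem.Dict String Int) (w k : String) (v u : Int)
    (hw : d.contains w = true) (hne : k ≠ w) :
    (d.insert w v).insert k u = (d.insert k u).insert w v := by
  apply PySem.Dict.ext
  have hkw : (d.insert w v).contains k = d.contains k := by
    simp [PySem.Dict.contains_insert, hne]
  have hwk : (d.insert k u).contains w = true := by
    simp [PySem.Dict.contains_insert, hw]
  rcases hk : d.contains k with _ | _
  · rw [PySem.Dict.items_insert_of_not_contains _ _ (hkw.trans hk),
        PySem.Dict.items_insert_of_contains _ _ hw,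
        PySem.Dict.items_insert_of_contains _ _ hwk,
        PySem.Dict.items_insert_of_not_contains _ _ hk,
        List.map_append]
    simp [hne]
  · rw [PySem.Dict.items_insert_of_contains _ _ (hkw.trans hk),
        PySem.Dict.items_insert_of_contains _ _ hw,
        PySem.Dict.items_insert_of_contains _ _ hwk,
        PySem.Dict.items_insert_of_contains _ _ hk,
        List.map_map, List.map_map]
    apply List.map_congr_left
    intro p _
    by_cases hpw : p.1 = w <;> by_cases hpk : p.1 = k <;>
      simp_all [Function.comp]

lemma cvdC_contains (d : PySem.Dict String Int) (p : String × Int) (w : String)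
    (h : d.contains w = true) : (cvdC d p).contains w = true := by
  unfold cvdC
  split
  · exact h
  · simp [PySem.Dict.contains_insert, h]

-- a stop-word-or-present global update commutes past an item update at another key
lemma step_comm (d : PySem.Dict String Int) (p : String × Int) (w : String)
    (hne : p.1 ≠ w) (h : w ∈ cvdB_stop ∨ d.contains w = true) :
    cvdC (cvdG d w) p = cvdG (cvdC d p) w := by
  by_cases hs : w ∈ cvdB_stop
  · simp [cvdG, hs]
  · rcases h with h | h
    · exact absurd h hs
    · by_cases hp : p.1 ∈ cvdB_stop
      · simp [cvdC, hp]
      · simp only [cvdC, cvdG, if_neg hs, if_neg hp]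
        rw [PySem.Dict.getD_insert_of_ne _ _ _ hne,
            PySem.Dict.getD_insert_of_ne _ _ _ (Ne.symm hne)]
        exact comm_insert d w p.1 _ _ h hne

lemma comm_fold (L : List (String × Int)) (d : PySem.Dict String Int) (w : String)
    (hL : ∀ p ∈ L, p.1 ≠ w) (h : w ∈ cvdB_stop ∨ d.contains w = true) :
    L.foldl cvdC (cvdG d w) = cvdG (L.foldl cvdC d) w := by
  induction L generalizing d with
  | nil => rfl
  | cons p L ih =>
    simp only [List.foldl_cons]
    rw [step_comm d p w (hL p (by simp)) h]
    exact ih (cvdC d p) (fun q hq => hL q (by simp [hq]))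
      (h.imp id (cvdC_contains d p w))

-- bumping a count by one is the same as one more single-word update at the end
lemma cvdC_succ (d : PySem.Dict String Int) (w : String) (c : Int) :
    cvdC d (w, c + 1) = cvdG (cvdC d (w, c)) w := by
  by_cases hs : w ∈ cvdB_stop
  · simp [cvdC, cvdG, hs]
  · simp only [cvdC, cvdG, if_neg hs]
    rw [PySem.Dict.getD_insert_self, PySem.Dict.insert_insert_self]
    ring_nf

-- MAIN LEMMA: folding the per-word update over the words equals folding the
-- per-item update over the word-count table of the phrase
lemma counts_fold (ws : List String) (v : PySem.Dict String Int) :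
    ((PySem.Set.ofList ws).map (fun k => (k, (ws.count k : Int)))).foldl cvdC v =
      ws.foldl cvdG v := by
  induction ws using List.reverseRecOn generalizing v with
  | nil => simp [PySem.Set.ofList]
  | append_singleton ws w ih =>
    rw [List.foldl_append, List.foldl_cons, List.foldl_nil]
    by_cases hw : w ∈ ws
    · -- the set of words is unchanged; only w's count goes up by one
      have hset : PySem.Set.ofList (ws ++ [w]) = PySem.Set.ofList ws := by
        rw [PySem.Set.ofList_eq_foldl, List.foldl_append, ← PySem.Set.ofList_eq_foldl]
        simp only [List.foldl_cons, List.foldl_nil, PySem.Set.add]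
        have : PySem.Set.contains (PySem.Set.ofList ws) w = true := by
          simp [PySem.Set.contains, PySem.Set.mem_ofList, hw]
        simp [PySem.Set.contains] at this
        simp [this]
      obtain ⟨s1, s2, hdec⟩ := List.append_of_mem ((PySem.Set.mem_ofList ws w).2 hw)
      have hnd : (s1 ++ w :: s2).Nodup := hdec ▸ PySem.Set.nodup_ofList ws
      have hw1 : w ∉ s1 := fun h => (List.disjoint_of_nodup_append hnd) h (by simp)
      have hw2 : w ∉ s2 := by
        have := (List.nodup_append.1 hnd).2.1
        simp only [List.nodup_cons] at this
        exact this.1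
      rw [hset, hdec, List.map_append, List.map_cons]
      have hc1 : s1.map (fun k => (k, ((ws ++ [w]).count k : Int))) =
          s1.map (fun k => (k, (ws.count k : Int))) := by
        apply List.map_congr_left; intro k hk
        have : k ≠ w := fun h => hw1 (h ▸ hk)
        simp [List.count_append, Ne.symm this]
      have hc2 : s2.map (fun k => (k, ((ws ++ [w]).count k : Int))) =
          s2.map (fun k => (k, (ws.count k : Int))) := by
        apply List.map_congr_left; intro k hk
        have : k ≠ w := fun h => hw2 (h ▸ hk)
        simp [List.count_append, Ne.symm this]
      have hcw : ((ws ++ [w]).count w : Int) = (ws.count w : Int) + 1 := by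
        simp [List.count_append]
      rw [hc1, hc2, hcw, List.foldl_append, List.foldl_cons, cvdC_succ, comm_fold]
      · rw [← List.foldl_cons, ← List.foldl_append]
        have ihv := ih v
        rw [hdec, List.map_append, List.map_cons] at ihv
        exact congrArg (fun d => cvdG d w) ihv
      · intro p hp
        obtain ⟨k, hk, rfl⟩ := List.mem_map.1 hp
        exact fun h => hw2 (h ▸ hk)
      · by_cases hs : w ∈ cvdB_stop
        · exact Or.inl hs
        · refine Or.inr ?_
          simp only [cvdC, if_neg hs]
          simp
    · -- w is new: it is appended to the set with count 1
      have hset : PySem.Set.ofList (ws ++ [w]) = PySem.Set.ofList ws ++ [w] := by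
        rw [PySem.Set.ofList_eq_foldl, List.foldl_append, ← PySem.Set.ofList_eq_foldl]
        simp only [List.foldl_cons, List.foldl_nil, PySem.Set.add]
        have : PySem.Set.contains (PySem.Set.ofList ws) w = false := by
          simp [PySem.Set.contains, PySem.Set.mem_ofList, hw]
        simp [PySem.Set.contains] at this
        simp [this]
      rw [hset, List.map_append, List.map_cons, List.map_nil]
      have hc1 : (PySem.Set.ofList ws).map (fun k => (k, ((ws ++ [w]).count k : Int))) =
          (PySem.Set.ofList ws).map (fun k => (k, (ws.count k : Int))) := by
        apply List.map_congr_left; intro k hk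
        have : k ≠ w := fun h => hw (h ▸ (PySem.Set.mem_ofList ws k).1 hk)
        simp [List.count_append, Ne.symm this]
      have hcw : ((ws ++ [w]).count w : Int) = 1 := by
        simp [List.count_append, List.count_eq_zero.2 hw]
      have hstep : ∀ d : PySem.Dict String Int, cvdC d (w, 1) = cvdG d w := by
        intro d; by_cases hs : w ∈ cvdB_stop <;> simp [cvdC, cvdG, hs]
      rw [hc1, hcw, List.foldl_append, List.foldl_cons, List.foldl_nil, hstep, ih]

-- ===== VERDICT (by name: the statement is the Claim_ definition above) =====
theorem create_vocab_dict_spec : Claim_equal_create_vocab_dict := by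
  intro data _
  show create_vocab_dict data = create_vocab_dict_alt data
  unfold create_vocab_dict create_vocab_dict_alt
  have h0 : (0 : Int) = (([] : List (PySem.Dict String Int)).length : Int) := by simp
  rw [h0, foldl_outer]
  simp only [List.length_nil, Nat.cast_zero, zero_add, List.nil_append, List.map_map,
    List.foldl_map]
  refine Prod.ext ?_ (Prod.ext rfl (List.map_congr_left (fun p _ => rfl)))
  show (List.foldl _ PySem.Dict.empty data).items = (List.foldl _ PySem.Dict.empty data).items
  congr 1
  apply PySem.List.foldl_congr_mem
  intro v p _
  show (PySem.Str.split₀ p).foldl cvdG v = (cvdB_counts p).items.foldl cvdC v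
  have hcnt : cvdB_counts p = PySem.Dict.counter (PySem.Str.split₀ p) :=
    PySem.Dict.foldl_insert_getD_add_one_eq_counter _
  rw [hcnt, PySem.Dict.items_counter, counts_fold]
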